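-- pv_equiv track=rewrite | github.com/xcube-dev/xcube-server | xcube_wmts/service.py | url_pattern
-- ===== SOURCE A (Python) =====
-- def url_pattern(pattern: str):
--     """
--     Convert a string *pattern* where any occurrences of ``{{NAME}}`` are replaced by an equivalent
--     regex expression which will assign matching character groups to NAME. Characters match until
--     one of the RFC 2396 reserved characters is found or the end of the *pattern* is reached.
--
--     The function can be used to map URLs patterns to request handlers as desired by the Tornado web server, see
--     http://www.tornadoweb.org/en/stable/web.html
--
--     RFC 2396 Uniform Resource Identifiers (URI): Generic Syntax lists
--     the following reserved characters::
--
--         reserved    = ";" | "/" | "?" | ":" | "@" | "&" | "=" | "+" | "$" | ","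
--
--     :param pattern: URL pattern
--     :return: equivalent regex pattern
--     :raise ValueError: if *pattern* is invalid
--     """
--     name_pattern = '(?P<%s>[^\;\/\?\:\@\&\=\+\$\,]+)'
--     reg_expr = ''
--     pos = 0
--     while True:
--         pos1 = pattern.find('{{', pos)
--         if pos1 >= 0:
--             pos2 = pattern.find('}}', pos1 + 2)
--             if pos2 > pos1:
--                 name = pattern[pos1 + 2:pos2]
--                 if not name.isidentifier():
--                     raise ValueError('name in {{name}} must be a valid identifier, but got "%s"' % name)
--                 reg_expr += pattern[pos:pos1] + (name_pattern % name)
--                 pos = pos2 + 2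
--             else:
--                 raise ValueError('no matching "}}" after "{{" in "%s"' % pattern)
--
--         else:
--             reg_expr += pattern[pos:]
--             break
--     return reg_expr
-- ===== SOURCE B (Python) =====
-- def url_pattern(pattern: str):
--     """Split on '{{' and partition each piece at '}}' (idiomatic rewrite of the find/pos loop)."""
--     name_pattern = '(?P<%s>[^\;\/\?\:\@\&\=\+\$\,]+)'
--     first, *rest = pattern.split('{{')
--     chunks = [first]
--     for part in rest:
--         name, sep, tail = part.partition('}}')
--         if not sep:
--             raise ValueError('no matching "}}" after "{{" in "%s"' % pattern)
--         if not name.isidentifier():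
--             raise ValueError('name in {{name}} must be a valid identifier, but got "%s"' % name)
--         chunks.append(name_pattern % name + tail)
--     return ''.join(chunks)
-- ===== Notes on version B (the rewrite author's own statement) =====
-- stated objective: idiomatic
-- what changed: Replaces the explicit find-loop with a pos pointer by a global split on '{{' followed by a partition of each piece at '}}' and a join; within the printable-ASCII input domain, Pre_ excludes exactly the inputs on which both A and B raise ValueError (missing '}}' or non-identifier name).
import Mathlib
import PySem

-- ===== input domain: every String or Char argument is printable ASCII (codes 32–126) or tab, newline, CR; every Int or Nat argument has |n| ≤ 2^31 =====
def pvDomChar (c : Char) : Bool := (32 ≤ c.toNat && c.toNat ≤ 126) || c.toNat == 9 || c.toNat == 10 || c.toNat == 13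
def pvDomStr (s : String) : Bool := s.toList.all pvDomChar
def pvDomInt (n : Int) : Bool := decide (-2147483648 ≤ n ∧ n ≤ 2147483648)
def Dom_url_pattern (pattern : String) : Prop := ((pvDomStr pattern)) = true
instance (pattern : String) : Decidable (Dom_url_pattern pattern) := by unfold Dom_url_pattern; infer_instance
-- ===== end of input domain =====

-- B replaces A's explicit find-loop with a pos pointer by a split-on-'{{' / partition-at-'}}' / join
-- decomposition (objective: idiomatic); on the raise inputs (excluded by Pre_) both raise ValueError.

-- Shared primitive: split a char list at the FIRST occurrence of the two-char needle [a, b],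
-- returning (text before it, text after it); none if the needle does not occur.
-- For A this is Python's s.find(needle, pos) fused with the two slices A takes around the result;
-- for B it is Python's str.partition(needle) (with none for "separator absent").
def splitFirst2 (a b : Char) : List Char → Option (List Char × List Char)
  | [] => none
  | [_] => none
  | x :: y :: t =>
    if x = a ∧ y = b then some ([], t)
    else match splitFirst2 a b (y :: t) with
      | none => none
      | some (p, r) => some (x :: p, r)

-- Python str.isidentifier, ported for the printable-ASCII strings the Dom_ preamble admits
-- (letters/digits are ASCII there; Python keywords count as identifiers, as in Python's method).
def isIdentChars : List Char → Bool
  | [] => false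
  | c :: t => (c.isAlpha || c = '_') && t.all (fun d => d.isAlphanum || d = '_')

-- name_pattern % name
def namePat (name : List Char) : List Char :=
  "(?P<".toList ++ name ++ ">[^\\;\\/\\?\\:\\@\\&\\=\\+\\$\\,]+)".toList

-- needed by urlA's termination argument, so it stays above the port
theorem splitFirst2_eq_append {a b : Char} : ∀ {s p r : List Char},
    splitFirst2 a b s = some (p, r) → s = p ++ a :: b :: r := by
  intro s
  induction s with
  | nil => intro p r h; simp [splitFirst2] at h
  | cons x t ih =>
    intro p r h
    match t with
    | [] => simp [splitFirst2] at h
    | y :: t' =>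
      rw [splitFirst2] at h
      split at h
      · rename_i hc
        obtain ⟨rfl, rfl⟩ := hc
        simp_all
      · rename_i hc
        cases hsub : splitFirst2 a b (y :: t') with
        | none => rw [hsub] at h; simp at h
        | some pr =>
          obtain ⟨p', r'⟩ := pr
          rw [hsub] at h
          simp at h
          obtain ⟨rfl, rfl⟩ := h
          have := ih hsub
          simp [this]

-- ===== PORT A =====
-- A's while-loop over pos, transliterated as recursion on the not-yet-consumed suffix:
-- find '{{' (none → emit the rest and stop), find '}}' after it (the Python test pos2 > pos1
-- is exactly "found", since find starts at pos1+2), check the name, emit, continue after '}}'.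
-- On A's two `raise ValueError` paths the port returns [] (those inputs are outside Pre_).
def urlA (s : List Char) : List Char :=
  match h1 : splitFirst2 '{' '{' s with
  | none => s
  | some (pre, rest) =>
    match h2 : splitFirst2 '}' '}' rest with
    | none => []  -- raise ValueError('no matching "}}" …')
    | some (name, rest2) =>
      if isIdentChars name then pre ++ namePat name ++ urlA rest2
      else []      -- raise ValueError('name … must be a valid identifier …')
termination_by s.length
decreasing_by
  have e1 := splitFirst2_eq_append h1
  have e2 := splitFirst2_eq_append h2
  subst e1; subst e2; simp; omega

def url_pattern (pattern : String) : String := String.mk (urlA pattern.toList)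

-- ===== PORT B =====
-- Python str.split('{{') (left-to-right, non-overlapping), structural recursion.
def splitAll2 (a b : Char) : List Char → List (List Char)
  | [] => [[]]
  | [x] => [[x]]
  | x :: y :: t =>
    if x = a ∧ y = b then [] :: splitAll2 a b t
    else match splitAll2 a b (y :: t) with
      | [] => [[x]]   -- unreachable: split never returns []
      | p :: ps => (x :: p) :: ps

-- body of B's for-loop: partition the piece at '}}', check the name, build the chunk
-- ([] on the two raise paths, outside Pre_).
def partChunk (p : List Char) : List Char :=
  match splitFirst2 '}' '}' p with
  | none => []  -- raise ValueError('no matching "}}" …')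
  | some (name, tail) =>
    if isIdentChars name then namePat name ++ tail
    else []     -- raise ValueError('name … must be a valid identifier …')

def urlB (s : List Char) : List Char :=
  match splitAll2 '{' '{' s with
  | [] => []   -- unreachable: split always returns at least one piece
  | first :: parts => first ++ (parts.map partChunk).flatten

def url_pattern_alt (pattern : String) : String := String.mk (urlB pattern.toList)

-- ===== PRECONDITION & SPEC =====
-- Pre_ excludes only A's two `raise ValueError` paths: a '{{' with no later '}}', or a name that is
-- not an identifier. Within the printable-ASCII domain (Dom_) that all claims are stated over this
-- is exactly A's non-raising set; B raises ValueError on the same inputs. Stated over the pattern's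
-- shape with the library string primitives: every piece after a '{{' (Python pattern.split('{{')[1:])
-- contains a '}}', and the text before its first '}}' is an identifier.
def Pre_url_pattern (pattern : String) : Prop :=
  (((PySem.Chars.splitOn pattern.toList ['{', '{']).tail).all fun p =>
    PySem.Chars.isIn ['}', '}'] p &&
      isIdentChars (p.take (PySem.Chars.find p ['}', '}']).toNat)) = true
instance (pattern : String) : Decidable (Pre_url_pattern pattern) := by unfold Pre_url_pattern; infer_instance

def pvWitness_url_pattern : String := "/tiles/{{z}}/{{x}}.png"

def Spec_url_pattern (pattern : String) (out : String) : Prop := out = url_pattern_alt pattern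
instance (pattern : String) (out : String) : Decidable (Spec_url_pattern pattern out) := by unfold Spec_url_pattern; infer_instance

-- ===== CLAIM (what is proved, stated in full; the proofs are below) =====
def Claim_equal_url_pattern : Prop := ∀ (pattern : String), Dom_url_pattern pattern → Pre_url_pattern pattern → Spec_url_pattern pattern (url_pattern pattern)

-- ===== LEMMAS AND PROOFS =====

theorem splitFirst2_cons {a b : Char} {x : Char} {s p r : List Char}
    (h : splitFirst2 a b (x :: s) = some (x :: p, r)) : splitFirst2 a b s = some (p, r) := by
  match s with
  | [] => simp [splitFirst2] at h
  | y :: t =>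
    rw [splitFirst2] at h
    split at h
    · simp at h
    · cases hsub : splitFirst2 a b (y :: t) with
      | none => rw [hsub] at h; simp at h
      | some pr =>
        obtain ⟨p', r'⟩ := pr
        rw [hsub] at h
        simp at h
        obtain ⟨h1, rfl⟩ := h
        rw [h1]

theorem splitFirst2_cons_none {a b : Char} {x : Char} {s : List Char}
    (h : splitFirst2 a b (x :: s) = none) : splitFirst2 a b s = none := by
  match s with
  | [] => simp [splitFirst2]
  | y :: t =>
    rw [splitFirst2] at h
    split at h
    · simp at h
    · cases hsub : splitFirst2 a b (y :: t) with
      | none => rfl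
      | some pr => obtain ⟨p', r'⟩ := pr; rw [hsub] at h; simp at h

-- first occurrence in u stays first in u ++ v
theorem splitFirst2_append_right {a b : Char} (v : List Char) : ∀ {u p r : List Char},
    splitFirst2 a b u = some (p, r) → splitFirst2 a b (u ++ v) = some (p, r ++ v) := by
  intro u
  induction u with
  | nil => intro p r h; simp [splitFirst2] at h
  | cons x t ih =>
    intro p r h
    match t with
    | [] => simp [splitFirst2] at h
    | y :: t' =>
      rw [splitFirst2] at h
      rw [List.cons_append, List.cons_append, splitFirst2]
      split at h
      · rename_i hc
        obtain ⟨rfl, rfl⟩ := hc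
        simp at h
        obtain ⟨rfl, rfl⟩ := h
        simp
      · rename_i hc
        rw [if_neg hc]
        cases hsub : splitFirst2 a b (y :: t') with
        | none => rw [hsub] at h; simp at h
        | some pr =>
          obtain ⟨p', r'⟩ := pr
          rw [hsub] at h
          simp at h
          obtain ⟨rfl, rfl⟩ := h
          have := ih hsub
          rw [List.cons_append] at this
          rw [this]

-- peel an agreed-on prefix off both the input and the result
theorem splitFirst2_cancel_prefix {a b : Char} : ∀ (u : List Char) {v p r : List Char},
    splitFirst2 a b (u ++ v) = some (u ++ p, r) → splitFirst2 a b v = some (p, r) := by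
  intro u
  induction u with
  | nil => intro v p r h; simpa using h
  | cons x t ih =>
    intro v p r h
    rw [List.cons_append] at h
    rw [List.cons_append] at h
    exact ih (splitFirst2_cons h)

-- no occurrence in u ++ v → none in v
theorem splitFirst2_none_suffix {a b : Char} : ∀ (u : List Char) {v : List Char},
    splitFirst2 a b (u ++ v) = none → splitFirst2 a b v = none := by
  intro u
  induction u with
  | nil => intro v h; simpa using h
  | cons x t ih =>
    intro v h
    rw [List.cons_append] at h
    exact ih (splitFirst2_cons_none h)

-- the position splitFirst2 splits at is minimal
theorem splitFirst2_min {a b : Char} : ∀ {s p r : List Char},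
    splitFirst2 a b s = some (p, r) → ∀ i, i < p.length → ¬ [a, b] <+: s.drop i := by
  intro s
  induction s with
  | nil => intro p r h; simp [splitFirst2] at h
  | cons x t ih =>
    intro p r h i hi
    match t with
    | [] => simp [splitFirst2] at h
    | y :: t' =>
      rw [splitFirst2] at h
      split at h
      · simp at h
        obtain ⟨rfl, rfl⟩ := h
        simp at hi
      · rename_i hc
        cases hsub : splitFirst2 a b (y :: t') with
        | none => rw [hsub] at h; simp at h
        | some pr =>
          obtain ⟨p', r'⟩ := pr
          rw [hsub] at h
          simp at h
          obtain ⟨rfl, rfl⟩ := h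
          match i with
          | 0 =>
            intro hpre
            rcases hpre with ⟨w, hw⟩
            simp at hw
            exact hc ⟨hw.1.symm, hw.2.1.symm⟩
          | i + 1 =>
            simp at hi ⊢
            exact ih hsub i (by omega)

-- the needle does not occur at all ↔ splitFirst2 finds nothing
theorem splitFirst2_none_of_no_prefix {a b : Char} : ∀ {s : List Char},
    splitFirst2 a b s = none → ∀ i, ¬ [a, b] <+: s.drop i := by
  intro s
  induction s with
  | nil => intro _ i; simp
  | cons x t ih =>
    intro h i
    match t with
    | [] =>
      intro hpre
      have := hpre.length_le
      match i with
      | 0 => simp at this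
      | 1 => simp at this
      | i + 2 => simp at this
    | y :: t' =>
      rw [splitFirst2] at h
      split at h
      · simp at h
      · rename_i hc
        cases hsub : splitFirst2 a b (y :: t') with
        | some pr => obtain ⟨p', r'⟩ := pr; rw [hsub] at h; simp at h
        | none =>
          match i with
          | 0 =>
            intro hpre
            rcases hpre with ⟨w, hw⟩
            simp at hw
            exact hc ⟨hw.1.symm, hw.2.1.symm⟩
          | i + 1 =>
            simp
            exact ih hsub i

-- bridge: Python's `'}}' in p` / p.find('}}') (the library primitives Pre_ is stated with)
-- against the partition primitive the ports use
theorem isIn_iff_splitFirst2 {a b : Char} {s : List Char} :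
    PySem.Chars.isIn [a, b] s = true ↔ ∃ pr, splitFirst2 a b s = some pr := by
  constructor
  · intro h
    cases hsp : splitFirst2 a b s with
    | some pr => exact ⟨pr, rfl⟩
    | none =>
      exfalso
      have hinf := (PySem.Chars.isIn_iff_infix _ _).mp h
      obtain ⟨u, v, huv⟩ := hinf
      have : [a, b] <+: s.drop u.length := by
        rw [← huv]
        simp [List.drop_left']
      exact splitFirst2_none_of_no_prefix hsp u.length this
  · rintro ⟨⟨p, r⟩, hsp⟩
    rw [PySem.Chars.isIn_iff_infix]
    exact ⟨p, r, by simp [splitFirst2_eq_append hsp]⟩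

theorem find_toNat_of_splitFirst2 {a b : Char} {s p r : List Char}
    (h : splitFirst2 a b s = some (p, r)) :
    (PySem.Chars.find s [a, b]).toNat = p.length := by
  have hs := splitFirst2_eq_append h
  have hinf : [a, b] <:+: s := ⟨p, r, by simp [hs]⟩
  have hnn : 0 ≤ PySem.Chars.find s [a, b] := (PySem.Chars.find_nonneg_iff _ _).mpr hinf
  obtain ⟨hat, hmin⟩ := PySem.Chars.find_spec hnn
  have hatp : [a, b] <+: s.drop p.length := by
    rw [hs]
    simp [List.drop_left']
  rcases Nat.lt_trichotomy (PySem.Chars.find s [a, b]).toNat p.length with hlt | heq | hgt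
  · exact absurd hat (splitFirst2_min h _ hlt)
  · exact heq
  · exact absurd hatp (hmin _ hgt)

-- ----- splitAll2: no piece is lost, and its recursive characterisation via splitFirst2 -----

theorem splitAll2_ne_nil {a b : Char} : ∀ (s : List Char), splitAll2 a b s ≠ [] := by
  intro s
  match s with
  | [] => simp [splitAll2]
  | [x] => simp [splitAll2]
  | x :: y :: t =>
    rw [splitAll2]
    split
    · simp
    · split <;> simp

theorem splitAll2_none {a b : Char} : ∀ {s : List Char},
    splitFirst2 a b s = none → splitAll2 a b s = [s] := by
  intro s
  induction s with
  | nil => intro _; rfl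
  | cons x t ih =>
    intro h
    match t with
    | [] => rfl
    | y :: t' =>
      rw [splitFirst2] at h
      rw [splitAll2]
      split at h
      · simp at h
      · rename_i hc
        rw [if_neg hc]
        cases hsub : splitFirst2 a b (y :: t') with
        | some pr => obtain ⟨p', r'⟩ := pr; rw [hsub] at h; simp at h
        | none => rw [ih hsub]

theorem splitAll2_some {a b : Char} : ∀ {s p r : List Char},
    splitFirst2 a b s = some (p, r) → splitAll2 a b s = p :: splitAll2 a b r := by
  intro s
  induction s with
  | nil => intro p r h; simp [splitFirst2] at h
  | cons x t ih =>
    intro p r h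
    match t with
    | [] => simp [splitFirst2] at h
    | y :: t' =>
      rw [splitFirst2] at h
      rw [splitAll2]
      split at h
      · rename_i hc
        obtain ⟨rfl, rfl⟩ := hc
        simp at h
        obtain ⟨rfl, rfl⟩ := h
        simp
      · rename_i hc
        rw [if_neg hc]
        cases hsub : splitFirst2 a b (y :: t') with
        | none => rw [hsub] at h; simp at h
        | some pr =>
          obtain ⟨p', r'⟩ := pr
          rw [hsub] at h
          simp at h
          obtain ⟨rfl, rfl⟩ := h
          rw [ih hsub]

-- ----- PySem.Chars.splitOn agrees with splitAll2 (so Pre_ talks about B's pieces) -----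

def prependFirst (x : List Char) : List (List Char) → List (List Char)
  | [] => [x]
  | p :: ps => (x ++ p) :: ps

theorem prependFirst_nil {ps : List (List Char)} (h : ps ≠ []) : prependFirst [] ps = ps := by
  match ps with
  | [] => exact absurd rfl h
  | p :: ps' => simp [prependFirst]

theorem prependFirst_comp (x y : List Char) (ps : List (List Char)) :
    prependFirst x (prependFirst y ps) = prependFirst (x ++ y) ps := by
  match ps with
  | [] => simp [prependFirst]
  | p :: ps' => simp [prependFirst]

theorem splitAll2_cons_not_prefix {a b : Char} {c : Char} {rest : List Char}
    (h : ¬ ([a, b].isPrefixOf (c :: rest) = true)) :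
    splitAll2 a b (c :: rest) = prependFirst [c] (splitAll2 a b rest) := by
  match rest with
  | [] => simp [splitAll2, prependFirst]
  | y :: t =>
    rw [splitAll2]
    have hc : ¬ (c = a ∧ y = b) := by
      intro ⟨rfl, rfl⟩
      simp [List.isPrefixOf] at h
    rw [if_neg hc]
    cases hsp : splitAll2 a b (y :: t) with
    | nil => exact absurd hsp (splitAll2_ne_nil _)
    | cons p ps => simp [prependFirst]

theorem splitOn_go_eq {a b : Char} : ∀ (fuel : Nat) (l cur : List Char) (acc : List (List Char)),
    l.length ≤ fuel →
    PySem.Chars.splitOn.go [a, b] fuel l cur acc =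
      acc.reverse ++ prependFirst cur.reverse (splitAll2 a b l) := by
  intro fuel
  induction fuel with
  | zero =>
    intro l cur acc hl
    have : l = [] := List.eq_nil_of_length_eq_zero (Nat.le_zero.mp hl)
    subst this
    simp [PySem.Chars.splitOn.go, splitAll2, prependFirst]
  | succ n ih =>
    intro l cur acc hl
    match l with
    | [] => simp [PySem.Chars.splitOn.go, splitAll2, prependFirst]
    | c :: rest =>
      rw [PySem.Chars.splitOn.go]
      match rest with
      | [] =>
        rw [if_neg (by simp [List.isPrefixOf])]
        rw [ih [] (c :: cur) acc (by simp)]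
        simp [splitAll2, prependFirst]
      | y :: t =>
        by_cases hc : c = a ∧ y = b
        · rw [if_pos (by simp [List.isPrefixOf, hc.1, hc.2])]
          have hdrop : List.drop ([a, b] : List Char).length (c :: y :: t) = t := by simp
          rw [hdrop]
          have hlen : t.length ≤ n := by simp at hl; omega
          rw [ih t [] (cur.reverse :: acc) hlen]
          have hsp : splitAll2 a b (c :: y :: t) = [] :: splitAll2 a b t := by
            rw [splitAll2, if_pos hc]
          rw [hsp]
          simp only [List.reverse_nil]
          rw [prependFirst_nil (splitAll2_ne_nil t)]
          simp [prependFirst]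
        · have hnp : ¬ ([a, b].isPrefixOf (c :: y :: t) = true) := by
            have hred : ([a, b].isPrefixOf (c :: y :: t)) = ((a == c) && (b == y)) := by
              simp [List.isPrefixOf]
            rw [hred]
            simp only [Bool.and_eq_true, beq_iff_eq]
            intro hcc
            exact hc ⟨hcc.1.symm, hcc.2.symm⟩
          rw [if_neg hnp]
          have hlen : (y :: t).length ≤ n := by simp at hl ⊢; omega
          rw [ih (y :: t) (c :: cur) acc hlen]
          rw [splitAll2_cons_not_prefix hnp]
          rw [prependFirst_comp]
          simp

theorem splitOn_eq_splitAll2 {a b : Char} (s : List Char) :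
    PySem.Chars.splitOn s [a, b] = splitAll2 a b s := by
  unfold PySem.Chars.splitOn
  rw [splitOn_go_eq (s.length + 1) s [] [] (by omega)]
  simp [prependFirst_nil (splitAll2_ne_nil s)]

-- ----- Pre_ in the form the equivalence proof consumes -----

def preOld (s : List Char) : Bool :=
  ((splitAll2 '{' '{' s).tail).all fun p =>
    match splitFirst2 '}' '}' p with
    | none => false
    | some (name, _) => isIdentChars name

theorem pre_to_preOld {pattern : String} (h : Pre_url_pattern pattern) :
    preOld pattern.toList = true := by
  unfold Pre_url_pattern at h
  rw [splitOn_eq_splitAll2] at h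
  unfold preOld
  rw [List.all_eq_true] at h ⊢
  intro p hp
  have hb := h p hp
  simp only [Bool.and_eq_true] at hb
  obtain ⟨hin, hid⟩ := hb
  obtain ⟨⟨name, r⟩, hsp⟩ := (isIn_iff_splitFirst2).mp hin
  rw [hsp]
  have hfind := find_toNat_of_splitFirst2 hsp
  have htake : p.take name.length = name := by
    have := splitFirst2_eq_append hsp
    rw [this]
    simp [List.take_left']
  rw [hfind, htake] at hid
  exact hid

-- ----- one-step unfoldings of the two ports -----

theorem urlA_none {s : List Char} (h : splitFirst2 '{' '{' s = none) : urlA s = s := by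
  rw [urlA]; split
  · rfl
  · rename_i h1; rw [h] at h1; exact absurd h1 (by simp)

theorem urlA_some {s pre rest name rest2 : List Char}
    (h1 : splitFirst2 '{' '{' s = some (pre, rest))
    (h2 : splitFirst2 '}' '}' rest = some (name, rest2))
    (hid : isIdentChars name = true) :
    urlA s = pre ++ namePat name ++ urlA rest2 := by
  rw [urlA]
  split
  · rename_i hx; rw [h1] at hx; simp at hx
  · rename_i pre' rest' hx
    rw [h1] at hx
    simp at hx
    obtain ⟨rfl, rfl⟩ := hx
    split
    · rename_i hy; rw [h2] at hy; simp at hy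
    · rename_i name' rest2' hy
      rw [h2] at hy
      simp at hy
      obtain ⟨rfl, rfl⟩ := hy
      rw [if_pos hid]

-- ----- the equivalence, by strong induction on the length of the remaining text -----

theorem urlA_eq_urlB : ∀ (n : Nat) (s : List Char), s.length ≤ n → preOld s = true → urlA s = urlB s := by
  intro n
  induction n with
  | zero =>
    intro s hs _
    have hnil : s = [] := List.eq_nil_of_length_eq_zero (Nat.le_zero.mp hs)
    subst hnil
    have h0 : splitFirst2 '{' '{' ([] : List Char) = none := by simp [splitFirst2]
    rw [urlA_none h0]
    unfold urlB
    rw [splitAll2_none h0]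
    simp
  | succ n ih =>
    intro s hs hpre
    cases h1 : splitFirst2 '{' '{' s with
    | none =>
      rw [urlA_none h1]
      unfold urlB
      rw [splitAll2_none h1]
      simp
    | some pr =>
      obtain ⟨pre, rest⟩ := pr
      have hs_eq := splitFirst2_eq_append h1
      have hall : ((splitAll2 '{' '{' rest).all fun p =>
          match splitFirst2 '}' '}' p with
          | none => false
          | some (name, _) => isIdentChars name) = true := by
        have := hpre
        unfold preOld at this
        rw [splitAll2_some h1] at this
        simpa using this
      cases h3 : splitFirst2 '{' '{' rest with
      | none =>
        -- rest is the last piece: its first '}}' is A's first '}}' and there is no further '{{'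
        rw [splitAll2_none h3] at hall
        simp at hall
        obtain ⟨⟨name, t⟩, h2, hid⟩ :
            ∃ nt, splitFirst2 '}' '}' rest = some nt ∧ isIdentChars nt.1 = true := by
          cases h2 : splitFirst2 '}' '}' rest with
          | none => rw [h2] at hall; simp at hall
          | some nt => rw [h2] at hall; exact ⟨nt, rfl, hall⟩
        have hrest_eq := splitFirst2_eq_append h2
        have ht_none : splitFirst2 '{' '{' t = none := by
          apply splitFirst2_none_suffix (name ++ ['}', '}'])
          have hx := h3
          rw [hrest_eq] at hx
          simpa [List.append_assoc] using hx
        rw [urlA_some h1 h2 hid, urlA_none ht_none]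
        unfold urlB
        rw [splitAll2_some h1, splitAll2_none h3]
        simp [partChunk, h2, hid]
      | some qr =>
        obtain ⟨q, r2⟩ := qr
        rw [splitAll2_some h3] at hall
        simp at hall
        obtain ⟨hq_pred, hall_r2⟩ := hall
        obtain ⟨⟨name, tail0⟩, h2q, hid⟩ :
            ∃ nt, splitFirst2 '}' '}' q = some nt ∧ isIdentChars nt.1 = true := by
          cases h2 : splitFirst2 '}' '}' q with
          | none => rw [h2] at hq_pred; simp at hq_pred
          | some nt => rw [h2] at hq_pred; exact ⟨nt, rfl, hq_pred⟩
        have hrest_eq := splitFirst2_eq_append h3     -- rest = q ++ '{'::'{'::r2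
        have hq_eq := splitFirst2_eq_append h2q       -- q = name ++ '}'::'}'::tail0
        -- A's '}}' search on rest finds the same (name, …) as B's partition of q
        have h2 : splitFirst2 '}' '}' rest = some (name, tail0 ++ '{' :: '{' :: r2) := by
          rw [hrest_eq]
          have := splitFirst2_append_right ('{' :: '{' :: r2) h2q
          simpa [List.append_assoc] using this
        -- the suffix A continues on splits at the '{{' that began the next piece
        have hnext : splitFirst2 '{' '{' (tail0 ++ '{' :: '{' :: r2) = some (tail0, r2) := by
          apply splitFirst2_cancel_prefix (name ++ ['}', '}'])
          have hx := h3
          rw [hrest_eq, hq_eq] at hx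
          simpa [List.append_assoc] using hx
        have hlen : (tail0 ++ '{' :: '{' :: r2).length ≤ n := by
          have e1 : s.length = pre.length + 2 + rest.length := by rw [hs_eq]; simp; omega
          have e2 : rest.length = q.length + 2 + r2.length := by rw [hrest_eq]; simp; omega
          have e3 : q.length = name.length + 2 + tail0.length := by rw [hq_eq]; simp; omega
          simp
          omega
        have hpre2 : preOld (tail0 ++ '{' :: '{' :: r2) = true := by
          unfold preOld
          rw [splitAll2_some hnext]
          simpa using hall_r2
        rw [urlA_some h1 h2 hid, ih _ hlen hpre2]
        unfold urlB
        rw [splitAll2_some h1, splitAll2_some h3, splitAll2_some hnext]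
        simp [partChunk, h2q, hid]

-- ===== VERDICT (by name: the statement is the Claim_ definition above) =====
theorem url_pattern_spec : Claim_equal_url_pattern := by
  intro pattern _ hpre
  unfold Spec_url_pattern url_pattern url_pattern_alt
  rw [urlA_eq_urlB pattern.toList.length pattern.toList le_rfl (pre_to_preOld hpre)]
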